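-- pv_equiv track=rewrite | github.com/ksomemo/Competitive-programming | atcoder/abc/101/D.py | ex_WA
-- ===== SOURCE A (Python) =====
-- def ex_WA(K):
--     base = 1
--     answers = [1]
--     x = 1
--     while answers[-1] < K:
--         if len(str(x)) != len(str(x + base)):
--             base *= 10
--         x += base
--         answers.append(x)
--
--     return answers[:K]
-- ===== SOURCE B (Python) =====
-- def ex_WA(K):
--     # Closed-form per index: the n-th term of the sequence 1..9,19..99,199..999,...
--     # is (n % 9 + 2) * 10 ** (n // 9) - 1; emit terms until the first one >= K.
--     answers = []
--     n = 0
--     while True: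
--         v = (n % 9 + 2) * 10 ** (n // 9) - 1
--         answers.append(v)
--         if v >= K:
--             return answers[:K]
--         n += 1
-- ===== Notes on version B (the rewrite author's own statement) =====
-- stated objective: simpler
-- what changed: Replaces the incremental base/str-length digit-rollover trick with a direct closed-form formula (n % 9 + 2) * 10**(n // 9) - 1 for the n-th term, emitted until the first term >= K.
import Mathlib
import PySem

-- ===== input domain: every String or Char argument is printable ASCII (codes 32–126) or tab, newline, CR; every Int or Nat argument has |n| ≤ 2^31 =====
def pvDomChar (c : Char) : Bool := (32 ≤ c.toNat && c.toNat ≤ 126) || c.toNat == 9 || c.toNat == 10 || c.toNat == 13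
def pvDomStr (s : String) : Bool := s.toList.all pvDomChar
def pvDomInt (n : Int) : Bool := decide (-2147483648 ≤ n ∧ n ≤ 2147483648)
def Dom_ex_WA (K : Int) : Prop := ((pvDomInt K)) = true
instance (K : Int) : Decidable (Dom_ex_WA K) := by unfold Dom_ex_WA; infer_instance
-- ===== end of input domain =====

-- B replaces A's incremental base/str-length digit-rollover trick with a closed-form
-- formula for the n-th term; objective: simpler (same asymptotic cost).


-- ===== PORT A =====
-- `if len(str(x)) != len(str(x + base)): base *= 10` — the value of base after the if
def pvNextBase (base x : Int) : Int :=
  if PySem.Str.len (PySem.Int.toStr x) ≠ PySem.Str.len (PySem.Int.toStr (x + base)) then base * 10 else base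

-- cited by the port's totality guard, so it stays above the port
theorem pvNextBase_pos (base x : Int) (hb : 0 < base) : 0 < pvNextBase base x := by
  unfold pvNextBase; split <;> omega

-- A's while loop; state (base, x, answers).  A's guard is `answers[-1] < K`:
-- `answers[-1]` is always the x appended last (initially both are 1), so the guard is
-- transliterated as `x < K`.  hb (base stays positive) is only a totality guard.
def exWALoop (K base x : Int) (hb : 0 < base) (answers : List Int) : List Int :=
  if x < K then
    exWALoop K (pvNextBase base x) (x + pvNextBase base x)
      (pvNextBase_pos base x hb)
      (answers ++ [x + pvNextBase base x])
  else answers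
termination_by (K - x).toNat
decreasing_by
  have := pvNextBase_pos base x hb
  omega

def ex_WA (K : Int) : List Int :=
  PySem.List.slice (exWALoop K 1 1 (by norm_num) [1]) none (some K)

-- ===== PORT B =====
-- growth of the n-th term (Nat form), cited by the loop's decreasing_by
theorem pvTenPow (q : Nat) : 9 * q + 1 ≤ 10 ^ q := by
  induction q with
  | zero => simp
  | succ q ih =>
    have h : (0:ℕ) < 10 ^ q := pow_pos (by norm_num) q
    rw [pow_succ]
    linarith

theorem pvTermGrowthNat (n : Nat) : n + 2 ≤ (n % 9 + 2) * 10 ^ (n / 9) := by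
  obtain ⟨q, r, hr, rfl⟩ : ∃ q r, r < 9 ∧ n = 9 * q + r :=
    ⟨n / 9, n % 9, Nat.mod_lt _ (by norm_num), by omega⟩
  have e1 : (9 * q + r) % 9 = r := by omega
  have e2 : (9 * q + r) / 9 = q := by omega
  rw [e1, e2]
  have h10 := pvTenPow q
  nlinarith [mul_le_mul_right h10 (r + 2)]

theorem pvTermGrowth (n : Nat) : (n : Int) + 1 ≤ (((n % 9 : Nat) : Int) + 2) * 10 ^ (n / 9) - 1 := by
  have h := pvTermGrowthNat n
  have h' : ((n : Int)) + 2 ≤ (((n % 9 : Nat) : Int) + 2) * 10 ^ (n / 9) := by exact_mod_cast h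
  linarith

-- B's while-True loop; n is Python's loop counter (always ≥ 0, hence a Nat);
-- `10 ** (n // 9)` is `10 ^ (n / 9)` since n ≥ 0.
def exWAaltLoop (K : Int) (n : Nat) (answers : List Int) : List Int :=
  -- v = (n % 9 + 2) * 10 ** (n // 9) - 1, inlined at its two uses
  if K ≤ (((n % 9 : Nat) : Int) + 2) * 10 ^ (n / 9) - 1 then
    PySem.List.slice (answers ++ [(((n % 9 : Nat) : Int) + 2) * 10 ^ (n / 9) - 1]) none (some K)
  else exWAaltLoop K (n + 1) (answers ++ [(((n % 9 : Nat) : Int) + 2) * 10 ^ (n / 9) - 1])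
termination_by (K - n).toNat
decreasing_by
  have h1 : ((n : Int)) + 1 < K := by
    have := pvTermGrowth n
    omega
  omega

def ex_WA_alt (K : Int) : List Int := exWAaltLoop K 0 []

-- ===== PRECONDITION & SPEC =====
def Spec_ex_WA (K : Int) (out : List Int) : Prop := out = ex_WA_alt K
instance (K : Int) (out : List Int) : Decidable (Spec_ex_WA K out) := by unfold Spec_ex_WA; infer_instance

-- ===== CLAIM (what is proved, stated in full; the proofs are below) =====
def Claim_equal_ex_WA : Prop := ∀ (K : Int), Dom_ex_WA K → Spec_ex_WA K (ex_WA K)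

-- ===== LEMMAS AND PROOFS =====

-- str-length digit test for the terms that actually occur (q ≤ 9, r ≤ 8):
-- the digit count changes exactly when r = 8 (the term is 10^(q+1) - 1)
set_option maxHeartbeats 2000000 in
theorem pvStrLenStep : ∀ q < 10, ∀ r < 9,
    ((PySem.Str.len (PySem.Int.toStr ((((r : Nat) : Int) + 2) * 10 ^ q - 1)) ≠
        PySem.Str.len (PySem.Int.toStr ((((r : Nat) : Int) + 2) * 10 ^ q - 1 + 10 ^ q))) ↔ r = 8) := by
  decide

-- the two loops, started at term n with the same accumulator, agree (for K ≤ 2^31)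
-- congruence for exWALoop in its Int/list arguments (proofs are irrelevant)
theorem exWALoop_congr {K b1 b2 x1 x2 : Int} {h1 : 0 < b1} {h2 : 0 < b2}
    {a1 a2 : List Int} (hb : b1 = b2) (hx : x1 = x2) (ha : a1 = a2) :
    exWALoop K b1 x1 h1 a1 = exWALoop K b2 x2 h2 a2 := by
  subst hb; subst hx; subst ha; rfl

set_option maxHeartbeats 1000000 in
theorem pvMain (K : Int) (hK : K ≤ 2147483648) (n : Nat) (acc : List Int)
    (hb : (0:Int) < 10 ^ (n / 9)) :
    PySem.List.slice
      (exWALoop K ((10:Int) ^ (n / 9)) ((((n % 9 : Nat) : Int) + 2) * 10 ^ (n / 9) - 1) hb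
        (acc ++ [(((n % 9 : Nat) : Int) + 2) * 10 ^ (n / 9) - 1])) none (some K)
      = exWAaltLoop K n acc := by
  rw [exWALoop, exWAaltLoop]
  set v : Int := (((n % 9 : Nat) : Int) + 2) * 10 ^ (n / 9) - 1 with hv
  by_cases hlt : v < K
  · rw [if_pos hlt, if_neg (show ¬ K ≤ v by omega)]
    have hr : n % 9 < 9 := Nat.mod_lt _ (by norm_num)
    have hvge : (10:Int) ^ (n / 9) ≤ v := by
      have h0 : (0:Int) ≤ ((n % 9 : Nat) : Int) := by positivity
      nlinarith
    have hq : n / 9 < 10 := by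
      have h2 : (10:Int) ^ (n / 9) < 10 ^ 10 := by
        have : (2147483648 : Int) < 10 ^ 10 := by norm_num
        omega
      exact (pow_lt_pow_iff_right₀ (by norm_num : (1:Int) < 10)).mp h2
    have hcond := pvStrLenStep (n / 9) hq (n % 9) hr
    rw [← hv] at hcond
    by_cases h8 : n % 9 = 8
    · have hnb : pvNextBase ((10:Int) ^ (n / 9)) v = 10 ^ (n / 9) * 10 := by
        unfold pvNextBase
        rw [if_pos (hcond.mpr h8)]
      have e1 : (n + 1) % 9 = 0 := by omega
      have e2 : (n + 1) / 9 = n / 9 + 1 := by omega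
      have hv' : v + 10 ^ (n / 9) * 10
          = ((((n + 1) % 9 : Nat) : Int) + 2) * 10 ^ ((n + 1) / 9) - 1 := by
        rw [e1, e2, hv, h8]
        push_cast
        ring
      have hb' : (0:Int) < 10 ^ ((n + 1) / 9) := by positivity
      have IH := pvMain K hK (n + 1) (acc ++ [v]) hb'
      refine Eq.trans ?_ IH
      refine congrArg (fun l => PySem.List.slice l none (some K)) (exWALoop_congr ?_ ?_ ?_)
      · rw [hnb, e2]; ring
      · rw [hnb]; exact hv'
      · rw [hnb, hv']
    · have hnb : pvNextBase ((10:Int) ^ (n / 9)) v = 10 ^ (n / 9) := by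
        unfold pvNextBase
        rw [if_neg (fun h => h8 (hcond.mp h))]
      have e1 : (n + 1) % 9 = n % 9 + 1 := by omega
      have e2 : (n + 1) / 9 = n / 9 := by omega
      have hv' : v + 10 ^ (n / 9)
          = ((((n + 1) % 9 : Nat) : Int) + 2) * 10 ^ ((n + 1) / 9) - 1 := by
        rw [e1, e2, hv]
        push_cast
        ring
      have hb' : (0:Int) < 10 ^ ((n + 1) / 9) := by positivity
      have IH := pvMain K hK (n + 1) (acc ++ [v]) hb'
      refine Eq.trans ?_ IH
      refine congrArg (fun l => PySem.List.slice l none (some K)) (exWALoop_congr ?_ ?_ ?_)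
      · rw [hnb, e2]
      · rw [hnb]; exact hv'
      · rw [hnb, hv']
  · rw [if_neg hlt, if_pos (show K ≤ v by omega)]
termination_by (K - n).toNat
decreasing_by
all_goals
  have h1 : ((n : Int)) + 1 < K := lt_of_le_of_lt (pvTermGrowth n) (hv ▸ hlt)
  omega

-- ===== VERDICT (by name: the statement is the Claim_ definition above) =====
theorem ex_WA_spec : Claim_equal_ex_WA := by
  intro K hDom
  have hK : K ≤ 2147483648 := by
    have := of_decide_eq_true hDom
    exact this.2
  unfold Spec_ex_WA ex_WA ex_WA_alt
  have h := pvMain K hK 0 [] (by norm_num)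
  simpa using h
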